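-- pv_equiv track=rewrite | github.com/NEOLEOPRO/YL_WebServer-API | main.py | getportrait
-- ===== SOURCE A (Python) =====
-- numb = {'1': 'I', '2': 'II', '3': 'III', '4': 'IV', '5': 'V', '6': 'VI', '7': 'VII', '8': 'VIII', '9': 'IX', '10': 'X', '11': 'XI', '12': 'XII', '13': 'XIII', '14': 'XIV', '15': 'XV', '16': 'XVI', '17': 'XVII', '18': 'XVIII', '19': 'XIX', '20': 'XX', '21': 'XXI', '0': 'XXII'}
--
-- def getportrait(d, m, y, d1=None, m1=None, y1=None):
--     d = d % (22 + int(d == 22))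
--     y = sum([int(i) for i in str(y)]) % 22
--     if d1 and m1 and y1:
--         d1 = d1 % (22 + int(d == 22))
--         y1 = sum([int(i) for i in str(y1)]) % 22
--         p = {'p1': d, 'p2': m, 'p3': y, 'p4': d + m, 'p5': m + y, 'p6': d + 2 * m + y, 'p7': d + m + y, 'p8': d + 3 * m + y, 'p1+': d1, 'p2+': m1, 'p3+': y1, 'p4+': d1 + m1, 'p5+': m1 + y1, 'p6+': d1 + 2 * m1 + y1, 'p7+': d1 + m1 + y1, 'p8+': d1 + 3 * m1 + y1}
--         p['p1c'] = p['p1'] + p['p1+']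
--         p['p2c'] = p['p2'] + p['p2+']
--         p['p3c'] = p['p3'] + p['p3+']
--         p['p4c'] = p['p4'] + p['p4+']
--         p['p5c'] = p['p5'] + p['p5+']
--         p['p6c'] = p['p6'] + p['p6+']
--         p['p7c'] = p['p7'] + p['p7+']
--         p['p8c'] = p['p8'] + p['p8+']
--         for i in p:
--             p[i] = numb[str(p[i] % 22)]
--     else:
--         p = {'p1': d, 'p2': m, 'p3': y, 'p4': d + m, 'p5': m + y, 'p6': d + 2 * m + y, 'p7': d + m + y, 'p8': d + 3 * m + y, 'p9': abs(d - m), 'p10': abs(m - y - 22 * (y == 0)), 'p11': abs(abs(d - m) - abs(m - y) + 22 * (int(d == m) - int(y == m))), 'p12': 2 * d + 4 * m + 2 * y, 'p16': 2 * d + 2 * m + 2 * y, 'p21': 3 * d + 5 * m + 3 * y, 'pA': 2 * d + m, 'pB': d + 2 * m, 'pC': 2 * m + y, 'pD': 2 * y + m, 'pE': 2 * d + 3 * m + y, 'pF': d + 3 * m + 2 * y, 'pH': 4 * d + 4 * m + y}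
--         for i in p:
--             p[i] = numb[str(p[i] % 22)]
--     return p
-- ===== SOURCE B (Python) =====
-- def _roman(n):
--     # greedy subtractive Roman numeral for 1 <= n <= 22
--     res = ''
--     for v, s in ((10, 'X'), (9, 'IX'), (5, 'V'), (4, 'IV'), (1, 'I')):
--         while n >= v:
--             res += s
--             n -= v
--     return res
--
--
-- def _code(v):
--     n = v % 22
--     return _roman(22 if n == 0 else n)
--
--
-- def _digitsum(x):
--     return sum(int(c) for c in str(x)) % 22
--
--
-- def getportrait(d, m, y, d1=None, m1=None, y1=None):
--     d = d % (22 + int(d == 22))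
--     y = _digitsum(y)
--     names = ['p1', 'p2', 'p3', 'p4', 'p5', 'p6', 'p7', 'p8']
--     base = [d, m, y, d + m, m + y, d + 2 * m + y, d + m + y, d + 3 * m + y]
--     if d1 and m1 and y1:
--         d1 = d1 % (22 + int(d == 22))
--         y1 = _digitsum(y1)
--         plus = [d1, m1, y1, d1 + m1, m1 + y1, d1 + 2 * m1 + y1,
--                 d1 + m1 + y1, d1 + 3 * m1 + y1]
--         items = list(zip(names, base)) \
--             + [(n + '+', v) for n, v in zip(names, plus)] \
--             + [(n + 'c', a + b) for n, (a, b) in zip(names, zip(base, plus))]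
--     else:
--         items = list(zip(names, base)) + [
--             ('p9', abs(d - m)),
--             ('p10', abs(m - y - 22 * (y == 0))),
--             ('p11', abs(abs(d - m) - abs(m - y) + 22 * (int(d == m) - int(y == m)))),
--             ('p12', 2 * d + 4 * m + 2 * y),
--             ('p16', 2 * d + 2 * m + 2 * y),
--             ('p21', 3 * d + 5 * m + 3 * y),
--             ('pA', 2 * d + m),
--             ('pB', d + 2 * m),
--             ('pC', 2 * m + y),
--             ('pD', 2 * y + m),
--             ('pE', 2 * d + 3 * m + y),
--             ('pF', d + 3 * m + 2 * y),
--             ('pH', 4 * d + 4 * m + y),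
--         ]
--     return {k: _code(v) for k, v in items}
-- ===== Notes on version B (the rewrite author's own statement) =====
-- stated objective: alternative
-- what changed: The precomputed 22-entry Roman-numeral lookup table is replaced by a greedy subtractive Roman-numeral conversion (mapping residue 0 to 22), and the portrait dict is built by zipping name/value lists instead of literal dict writes followed by an in-place rewrite loop.
import Mathlib
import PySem

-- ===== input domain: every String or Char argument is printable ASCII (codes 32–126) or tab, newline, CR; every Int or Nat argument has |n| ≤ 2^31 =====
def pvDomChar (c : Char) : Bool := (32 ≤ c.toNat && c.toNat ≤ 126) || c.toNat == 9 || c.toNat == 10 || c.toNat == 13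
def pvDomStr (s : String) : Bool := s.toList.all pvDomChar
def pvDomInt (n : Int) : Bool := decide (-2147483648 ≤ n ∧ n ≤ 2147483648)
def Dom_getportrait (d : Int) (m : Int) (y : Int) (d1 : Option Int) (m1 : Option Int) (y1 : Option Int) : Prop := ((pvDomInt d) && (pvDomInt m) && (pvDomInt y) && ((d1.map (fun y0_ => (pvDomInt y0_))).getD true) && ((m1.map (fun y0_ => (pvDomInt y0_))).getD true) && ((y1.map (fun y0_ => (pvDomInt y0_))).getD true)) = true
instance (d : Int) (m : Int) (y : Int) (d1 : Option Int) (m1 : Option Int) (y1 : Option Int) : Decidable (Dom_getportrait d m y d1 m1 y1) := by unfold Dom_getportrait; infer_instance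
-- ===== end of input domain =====

-- B replaces A's precomputed numeral lookup table by a greedy subtractive Roman-numeral
-- conversion and builds the portrait as name/value lists zipped together (objective: alternative).

-- Python truthiness of an optional int ('if d1 and m1 and y1')
def pyTruthy (o : Option Int) : Bool :=
  match o with
  | none => false
  | some n => n != 0

-- sum([int(i) for i in str(x)]) % 22 ; the '.getD 0' is unreachable under Pre_ (x ≥ 0 ⇒ every char of str(x) is a digit)
def sumDigitsMod22 (x : Int) : Int :=
  PySem.Int.mod (((PySem.Int.toStr x).toList.map
    (fun c => (PySem.Int.ofStr? (String.mk [c])).getD 0)).sum) 22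

-- ===== PORT A =====
-- the module-level 'numb' table
def numbA : PySem.Dict String String := PySem.Dict.ofList
  [("1","I"),("2","II"),("3","III"),("4","IV"),("5","V"),("6","VI"),("7","VII"),("8","VIII"),
   ("9","IX"),("10","X"),("11","XI"),("12","XII"),("13","XIII"),("14","XIV"),("15","XV"),
   ("16","XVI"),("17","XVII"),("18","XVIII"),("19","XIX"),("20","XX"),("21","XXI"),("0","XXII")]

-- numb[str(v % 22)] ; the key is always present (v % 22 ∈ 0..21), so the KeyError branch ('.getD ""') is unreachable
def codeA (v : Int) : String :=
  (numbA.get? (PySem.Int.toStr (PySem.Int.mod v 22))).getD ""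

def getportrait (d : Int) (m : Int) (y : Int) (d1 : Option Int) (m1 : Option Int) (y1 : Option Int) : List (String × String) :=
  let dd := PySem.Int.mod d (22 + (if d = 22 then (1:Int) else 0))
  let yy := sumDigitsMod22 y
  if pyTruthy d1 && pyTruthy m1 && pyTruthy y1 then
    let dv := PySem.Int.mod (d1.getD 0) (22 + (if dd = 22 then (1:Int) else 0))
    let mv := m1.getD 0
    let yv := sumDigitsMod22 (y1.getD 0)
    -- dict literal, then the eight appended 'pNc' keys (new keys append in order)
    let p : List (String × Int) :=
      [("p1",dd),("p2",m),("p3",yy),("p4",dd+m),("p5",m+yy),("p6",dd+2*m+yy),("p7",dd+m+yy),("p8",dd+3*m+yy),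
       ("p1+",dv),("p2+",mv),("p3+",yv),("p4+",dv+mv),("p5+",mv+yv),("p6+",dv+2*mv+yv),("p7+",dv+mv+yv),("p8+",dv+3*mv+yv),
       ("p1c",dd+dv),("p2c",m+mv),("p3c",yy+yv),("p4c",(dd+m)+(dv+mv)),("p5c",(m+yy)+(mv+yv)),
       ("p6c",(dd+2*m+yy)+(dv+2*mv+yv)),("p7c",(dd+m+yy)+(dv+mv+yv)),("p8c",(dd+3*m+yy)+(dv+3*mv+yv))]
    -- for i in p: p[i] = numb[str(p[i] % 22)]  (in-place value update, keys and order unchanged)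
    p.map (fun kv => (kv.1, codeA kv.2))
  else
    let p : List (String × Int) :=
      [("p1",dd),("p2",m),("p3",yy),("p4",dd+m),("p5",m+yy),("p6",dd+2*m+yy),("p7",dd+m+yy),("p8",dd+3*m+yy),
       ("p9",|dd-m|),("p10",|m-yy-22*(if yy = 0 then (1:Int) else 0)|),
       ("p11",|(|dd-m|)-(|m-yy|)+22*((if dd = m then (1:Int) else 0)-(if yy = m then (1:Int) else 0))|),
       ("p12",2*dd+4*m+2*yy),("p16",2*dd+2*m+2*yy),("p21",3*dd+5*m+3*yy),
       ("pA",2*dd+m),("pB",dd+2*m),("pC",2*m+yy),("pD",2*yy+m),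
       ("pE",2*dd+3*m+yy),("pF",dd+3*m+2*yy),("pH",4*dd+4*m+yy)]
    p.map (fun kv => (kv.1, codeA kv.2))

-- ===== PORT B =====
-- one 'while n >= v: res += s; n -= v' loop; fuel = the entering n is enough since each pass removes v ≥ 1
def romanRep (v : Nat) (s : String) (n : Nat) (fuel : Nat) : String × Nat :=
  match fuel with
  | 0 => ("", n)
  | fuel + 1 =>
    if 0 < v ∧ v ≤ n then
      let p := romanRep v s (n - v) fuel
      (s ++ p.1, p.2)
    else ("", n)

-- greedy subtractive Roman numeral over ((10,'X'),(9,'IX'),(5,'V'),(4,'IV'),(1,'I'))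
def roman (n : Nat) : String :=
  let p1 := romanRep 10 "X" n n
  let p2 := romanRep 9 "IX" p1.2 p1.2
  let p3 := romanRep 5 "V" p2.2 p2.2
  let p4 := romanRep 4 "IV" p3.2 p3.2
  let p5 := romanRep 1 "I" p4.2 p4.2
  p1.1 ++ p2.1 ++ p3.1 ++ p4.1 ++ p5.1

-- _code: n = v % 22; roman(22 if n == 0 else n)  (the argument is in 1..22, so '.toNat' is exact)
def codeB (v : Int) : String :=
  let n := PySem.Int.mod v 22
  roman (if n = 0 then (22:Int) else n).toNat

def getportrait_alt (d : Int) (m : Int) (y : Int) (d1 : Option Int) (m1 : Option Int) (y1 : Option Int) : List (String × String) :=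
  let dd := PySem.Int.mod d (22 + (if d = 22 then (1:Int) else 0))
  let yy := sumDigitsMod22 y
  let names : List String := ["p1","p2","p3","p4","p5","p6","p7","p8"]
  let base : List Int := [dd, m, yy, dd+m, m+yy, dd+2*m+yy, dd+m+yy, dd+3*m+yy]
  if pyTruthy d1 && pyTruthy m1 && pyTruthy y1 then
    let dv := PySem.Int.mod (d1.getD 0) (22 + (if dd = 22 then (1:Int) else 0))
    let mv := m1.getD 0
    let yv := sumDigitsMod22 (y1.getD 0)
    let plus : List Int := [dv, mv, yv, dv+mv, mv+yv, dv+2*mv+yv, dv+mv+yv, dv+3*mv+yv]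
    let items := names.zip base
      ++ (names.zip plus).map (fun nv => (nv.1 ++ "+", nv.2))
      ++ (names.zip (base.zip plus)).map (fun x => (x.1 ++ "c", x.2.1 + x.2.2))
    items.map (fun kv => (kv.1, codeB kv.2))
  else
    let items := names.zip base ++
      [("p9",|dd-m|),("p10",|m-yy-22*(if yy = 0 then (1:Int) else 0)|),
       ("p11",|(|dd-m|)-(|m-yy|)+22*((if dd = m then (1:Int) else 0)-(if yy = m then (1:Int) else 0))|),
       ("p12",2*dd+4*m+2*yy),("p16",2*dd+2*m+2*yy),("p21",3*dd+5*m+3*yy),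
       ("pA",2*dd+m),("pB",dd+2*m),("pC",2*m+yy),("pD",2*yy+m),
       ("pE",2*dd+3*m+yy),("pF",dd+3*m+2*yy),("pH",4*dd+4*m+yy)]
    items.map (fun kv => (kv.1, codeB kv.2))

-- ===== PRECONDITION & SPEC =====
-- Pre_ excludes exactly the inputs on which A raises ValueError: negative y (and, when the
-- second date is given and truthy, negative y1), whose str() contains '-' and breaks int(i).
def Pre_getportrait (d : Int) (m : Int) (y : Int) (d1 : Option Int) (m1 : Option Int) (y1 : Option Int) : Prop :=
  0 ≤ y ∧ ((pyTruthy d1 && pyTruthy m1 && pyTruthy y1) = true → 0 ≤ y1.getD 0)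
instance (d : Int) (m : Int) (y : Int) (d1 : Option Int) (m1 : Option Int) (y1 : Option Int) : Decidable (Pre_getportrait d m y d1 m1 y1) := by unfold Pre_getportrait; infer_instance

def pvWitness_getportrait : Int × Int × Int × Option Int × Option Int × Option Int :=
  (5, 3, 1990, some 7, some 4, some 1988)

def Spec_getportrait (d : Int) (m : Int) (y : Int) (d1 : Option Int) (m1 : Option Int) (y1 : Option Int) (out : List (String × String)) : Prop := out = getportrait_alt d m y d1 m1 y1
instance (d : Int) (m : Int) (y : Int) (d1 : Option Int) (m1 : Option Int) (y1 : Option Int) (out : List (String × String)) : Decidable (Spec_getportrait d m y d1 m1 y1 out) := by unfold Spec_getportrait; infer_instance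

-- ===== CLAIM (what is proved, stated in full; the proofs are below) =====
def Claim_equal_getportrait : Prop := ∀ (d : Int) (m : Int) (y : Int) (d1 : Option Int) (m1 : Option Int) (y1 : Option Int), Dom_getportrait d m y d1 m1 y1 → Pre_getportrait d m y d1 m1 y1 → Spec_getportrait d m y d1 m1 y1 (getportrait d m y d1 m1 y1)

-- ===== LEMMAS AND PROOFS =====

theorem code_eq_bounded : ∀ n : Int, 0 ≤ n → n < 22 →
    (numbA.get? (PySem.Int.toStr n)).getD "" = roman (if n = 0 then (22:Int) else n).toNat := by
  intro n h0 h1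
  interval_cases n <;> decide

theorem codeA_eq_codeB (v : Int) : codeA v = codeB v := by
  unfold codeA codeB
  have hm : PySem.Int.mod v 22 = v % 22 := by
    simp [PySem.Int.mod, Int.fmod_eq_emod]
  rw [hm]
  exact code_eq_bounded (v % 22) (Int.emod_nonneg v (by norm_num)) (Int.emod_lt_of_pos v (by norm_num))

-- ===== VERDICT (by name: the statement is the Claim_ definition above) =====
theorem getportrait_spec : Claim_equal_getportrait := by
  intro d m y d1 m1 y1 _ _
  unfold Spec_getportrait getportrait getportrait_alt
  by_cases hc : (pyTruthy d1 && pyTruthy m1 && pyTruthy y1) = true <;>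
    simp [hc, codeA_eq_codeB]
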